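-- pv_equiv track=rewrite | github.com/Luxusio/harness | plugin/scripts/write_checkpoint.py | _next_action
-- ===== SOURCE A (Python) =====
-- def _next_action(state: dict, active_acs: list[dict]) -> str:
--     status = (state.get("status") or "").lower()
--     verdict = (state.get("runtime_verdict") or "pending").upper()
--     if status in ("", "created"):
--         return "Open plan skill — PLAN.md not yet created."
--     if status == "planning":
--         return "Resume plan skill — plan_session_state may be open."
--     failed = [a for a in active_acs if a["status"] == "failed"]
--     if failed:
--         return f"Address {len(failed)} failed AC(s): {', '.join(a['id'] for a in failed[:3])}"
--     open_acs = [a for a in active_acs if a["status"] == "open"]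
--     if open_acs:
--         return f"{len(open_acs)} AC(s) still open — continue develop lane."
--     impl = [a for a in active_acs if a["status"] == "implemented_candidate"]
--     if impl:
--         return f"{len(impl)} AC(s) at implemented_candidate — run task_verify."
--     if verdict != "PASS":
--         return "All ACs passed status-wise — run task_verify to gate runtime_verdict."
--     return "runtime_verdict PASS — run task_close."
-- ===== SOURCE B (Python) =====
-- def _next_action(state: dict, active_acs: list[dict]) -> str:
--     status = (state.get("status") or "").lower()
--     if status in ("", "created"):
--         return "Open plan skill — PLAN.md not yet created."
--     if status == "planning":
--         return "Resume plan skill — plan_session_state may be open."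
--     # one pass: count each relevant status, keep only the first three failed ACs
--     n_failed = n_open = n_impl = 0
--     first_failed = []
--     for a in active_acs:
--         st = a["status"]
--         if st == "failed":
--             n_failed += 1
--             if len(first_failed) < 3:
--                 first_failed.append(a)
--         elif st == "open":
--             n_open += 1
--         elif st == "implemented_candidate":
--             n_impl += 1
--     if n_failed:
--         return f"Address {n_failed} failed AC(s): {', '.join(a['id'] for a in first_failed)}"
--     if n_open:
--         return f"{n_open} AC(s) still open — continue develop lane."
--     if n_impl:
--         return f"{n_impl} AC(s) at implemented_candidate — run task_verify."
--     verdict = (state.get("runtime_verdict") or "pending").upper()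
--     if verdict != "PASS":
--         return "All ACs passed status-wise — run task_verify to gate runtime_verdict."
--     return "runtime_verdict PASS — run task_close."
-- ===== Notes on version B (the rewrite author's own statement) =====
-- stated objective: alternative
-- what changed: B replaces A's three separate list-comprehension passes over active_acs (failed/open/implemented_candidate) by a single accumulating pass that counts each status and keeps only the first three failed ACs, computing the verdict lazily.
import Mathlib
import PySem

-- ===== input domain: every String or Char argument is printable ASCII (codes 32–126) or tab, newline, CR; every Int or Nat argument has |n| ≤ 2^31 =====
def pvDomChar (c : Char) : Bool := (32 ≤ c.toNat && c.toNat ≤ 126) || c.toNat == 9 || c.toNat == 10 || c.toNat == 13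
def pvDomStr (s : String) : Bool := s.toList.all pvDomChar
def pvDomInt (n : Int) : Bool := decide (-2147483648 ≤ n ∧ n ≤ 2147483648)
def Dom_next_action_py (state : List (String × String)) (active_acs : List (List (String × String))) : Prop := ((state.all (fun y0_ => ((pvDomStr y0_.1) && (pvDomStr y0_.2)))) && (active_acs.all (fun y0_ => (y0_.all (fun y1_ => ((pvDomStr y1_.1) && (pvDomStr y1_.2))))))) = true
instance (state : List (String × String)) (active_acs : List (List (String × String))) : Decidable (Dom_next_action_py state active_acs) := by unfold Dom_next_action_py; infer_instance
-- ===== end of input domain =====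

-- B replaces A's three separate filter passes over active_acs by a single fold that counts the
-- failed/open/implemented_candidate statuses and keeps the first three failed ACs (objective: alternative/simpler traversal).

-- shared primitive: Python's d.get(k) on a dict built from the pairs (last duplicate wins)
def pvGet (d : List (String × String)) (k : String) : Option String :=
  (PySem.Dict.ofList d).get? k

-- ===== PORT A =====
def next_action_py (state : List (String × String)) (active_acs : List (List (String × String))) : String :=
  let status := PySem.Str.lower ((pvGet state "status").getD "")      -- (… or "") : falsy "" stays ""
  let rawVerdict := (pvGet state "runtime_verdict").getD ""
  let verdict := PySem.Str.upper (if rawVerdict = "" then "pending" else rawVerdict)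
  if status = "" ∨ status = "created" then "Open plan skill — PLAN.md not yet created."
  else if status = "planning" then "Resume plan skill — plan_session_state may be open."
  else
    let failed := active_acs.filter (fun a => (pvGet a "status").getD "" == "failed")
    if failed ≠ [] then
      "Address " ++ PySem.Int.toStr (failed.length : Int) ++ " failed AC(s): " ++
        PySem.Str.join ", " ((failed.take 3).map (fun a => (pvGet a "id").getD ""))
    else
      let open_acs := active_acs.filter (fun a => (pvGet a "status").getD "" == "open")
      if open_acs ≠ [] then
        PySem.Int.toStr (open_acs.length : Int) ++ " AC(s) still open — continue develop lane."
      else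
        let impl := active_acs.filter (fun a => (pvGet a "status").getD "" == "implemented_candidate")
        if impl ≠ [] then
          PySem.Int.toStr (impl.length : Int) ++ " AC(s) at implemented_candidate — run task_verify."
        else if verdict ≠ "PASS" then
          "All ACs passed status-wise — run task_verify to gate runtime_verdict."
        else "runtime_verdict PASS — run task_close."

-- ===== PORT B =====
-- one step of B's single pass: (n_failed, n_open, n_impl, first_failed)
def pvStepB (acc : Int × Int × Int × List (List (String × String))) (a : List (String × String)) :
    Int × Int × Int × List (List (String × String)) :=
  let st := (pvGet a "status").getD ""
  if st == "failed" then
    (acc.1 + 1, acc.2.1, acc.2.2.1, if acc.2.2.2.length < 3 then acc.2.2.2 ++ [a] else acc.2.2.2)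
  else if st == "open" then (acc.1, acc.2.1 + 1, acc.2.2.1, acc.2.2.2)
  else if st == "implemented_candidate" then (acc.1, acc.2.1, acc.2.2.1 + 1, acc.2.2.2)
  else acc

def next_action_py_alt (state : List (String × String)) (active_acs : List (List (String × String))) : String :=
  let status := PySem.Str.lower ((pvGet state "status").getD "")
  if status = "" ∨ status = "created" then "Open plan skill — PLAN.md not yet created."
  else if status = "planning" then "Resume plan skill — plan_session_state may be open."
  else
    let r := active_acs.foldl pvStepB (0, 0, 0, [])
    if r.1 ≠ 0 then
      "Address " ++ PySem.Int.toStr r.1 ++ " failed AC(s): " ++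
        PySem.Str.join ", " (r.2.2.2.map (fun a => (pvGet a "id").getD ""))
    else if r.2.1 ≠ 0 then
      PySem.Int.toStr r.2.1 ++ " AC(s) still open — continue develop lane."
    else if r.2.2.1 ≠ 0 then
      PySem.Int.toStr r.2.2.1 ++ " AC(s) at implemented_candidate — run task_verify."
    else
      let rawVerdict := (pvGet state "runtime_verdict").getD ""
      let verdict := PySem.Str.upper (if rawVerdict = "" then "pending" else rawVerdict)
      if verdict ≠ "PASS" then
        "All ACs passed status-wise — run task_verify to gate runtime_verdict."
      else "runtime_verdict PASS — run task_close."

-- ===== PRECONDITION & SPEC =====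
-- Pre_ excludes exactly the inputs where A raises KeyError: past the early status guards, A reads
-- a["status"] of every AC and a["id"] of the first three failed ACs.
def Pre_next_action_py (state : List (String × String)) (active_acs : List (List (String × String))) : Prop :=
  (PySem.Str.lower ((pvGet state "status").getD "") = "" ∨
   PySem.Str.lower ((pvGet state "status").getD "") = "created" ∨
   PySem.Str.lower ((pvGet state "status").getD "") = "planning") ∨
  ((∀ a ∈ active_acs, (pvGet a "status").isSome = true) ∧
   (∀ a ∈ (active_acs.filter (fun a => (pvGet a "status").getD "" == "failed")).take 3,
      (pvGet a "id").isSome = true))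
instance (state : List (String × String)) (active_acs : List (List (String × String))) : Decidable (Pre_next_action_py state active_acs) := by unfold Pre_next_action_py; infer_instance

def pvWitness_next_action_py : (List (String × String)) × (List (List (String × String))) :=
  ([("status", "developing")], [[("status", "open"), ("id", "AC1")]])

def Spec_next_action_py (state : List (String × String)) (active_acs : List (List (String × String))) (out : String) : Prop := out = next_action_py_alt state active_acs
instance (state : List (String × String)) (active_acs : List (List (String × String))) (out : String) : Decidable (Spec_next_action_py state active_acs out) := by unfold Spec_next_action_py; infer_instance

-- ===== CLAIM (what is proved, stated in full; the proofs are below) =====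
def Claim_equal_next_action_py : Prop := ∀ (state : List (String × String)) (active_acs : List (List (String × String))), Dom_next_action_py state active_acs → Pre_next_action_py state active_acs → Spec_next_action_py state active_acs (next_action_py state active_acs)

-- ===== LEMMAS AND PROOFS =====

-- B's single pass computes the three counts and the first three failed ACs
theorem pvLoopB_spec (l : List (List (String × String))) (nf no ni : Int)
    (ff : List (List (String × String))) (h : ff.length ≤ 3) :
    l.foldl pvStepB (nf, no, ni, ff) =
      (nf + (l.countP (fun a => (pvGet a "status").getD "" == "failed") : Int),
       no + (l.countP (fun a => (pvGet a "status").getD "" == "open") : Int),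
       ni + (l.countP (fun a => (pvGet a "status").getD "" == "implemented_candidate") : Int),
       ff ++ (l.filter (fun a => (pvGet a "status").getD "" == "failed")).take (3 - ff.length)) := by
  induction l generalizing nf no ni ff with
  | nil => simp
  | cons a l ih =>
    simp only [List.foldl_cons, List.countP_cons, List.filter_cons]
    by_cases hf : ((pvGet a "status").getD "" == "failed") = true
    · have hst : (pvGet a "status").getD "" = "failed" := by simpa using hf
      have h1 : ((pvGet a "status").getD "" == "open") = false := by rw [hst]; decide
      have h2 : ((pvGet a "status").getD "" == "implemented_candidate") = false := by
        rw [hst]; decide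
      by_cases hlt : ff.length < 3
      · rw [show pvStepB (nf, no, ni, ff) a
              = (nf + 1, no, ni, ff ++ [a]) by simp [pvStepB, hf, hlt]]
        rw [ih _ _ _ _ (by simpa using Nat.succ_le_of_lt hlt)]
        have htake : 3 - ff.length = (3 - (ff.length + 1)) + 1 := by omega
        simp [hf, h1, h2, htake, List.take_succ_cons]; omega
      · rw [show pvStepB (nf, no, ni, ff) a = (nf + 1, no, ni, ff) by simp [pvStepB, hf, hlt]]
        rw [ih _ _ _ _ h]
        have hlen : ff.length = 3 := by omega
        simp [hf, h1, h2, hlen]; omega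
    · by_cases ho : ((pvGet a "status").getD "" == "open") = true
      · have hst : (pvGet a "status").getD "" = "open" := by simpa using ho
        have h2 : ((pvGet a "status").getD "" == "implemented_candidate") = false := by
          rw [hst]; decide
        rw [show pvStepB (nf, no, ni, ff) a = (nf, no + 1, ni, ff) by
              simp [pvStepB, hf, ho]]
        rw [ih _ _ _ _ h]
        simp [hf, ho, h2]; omega
      · by_cases hi : ((pvGet a "status").getD "" == "implemented_candidate") = true
        · rw [show pvStepB (nf, no, ni, ff) a = (nf, no, ni + 1, ff) by
                simp [pvStepB, hf, ho, hi]]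
          rw [ih _ _ _ _ h]
          simp [hf, ho, hi]; omega
        · rw [show pvStepB (nf, no, ni, ff) a = (nf, no, ni, ff) by
                simp [pvStepB, hf, ho, hi]]
          rw [ih _ _ _ _ h]
          simp [hf, ho, hi]

-- ===== VERDICT (by name: the statement is the Claim_ definition above) =====
theorem next_action_py_spec : Claim_equal_next_action_py := by
  intro state active_acs _ _
  unfold Spec_next_action_py next_action_py next_action_py_alt
  by_cases h1 : (PySem.Str.lower ((pvGet state "status").getD "") = "" ∨
                 PySem.Str.lower ((pvGet state "status").getD "") = "created")
  · simp only [h1, if_pos]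
  · simp only [h1, if_false]
    by_cases h2 : PySem.Str.lower ((pvGet state "status").getD "") = "planning"
    · simp only [h2, if_pos]
    · simp only [h2, if_false]
      rw [pvLoopB_spec active_acs 0 0 0 [] (by simp)]
      have hlen : ∀ (p : List (String × String) → Bool),
          (List.filter p active_acs ≠ []) ↔ (((List.countP p active_acs : Int)) ≠ 0) := by
        intro p
        rw [List.countP_eq_length_filter]
        constructor
        · intro hne h0
          exact hne (List.eq_nil_of_length_eq_zero (by exact_mod_cast h0))
        · intro h0 hnil
          apply h0; simp [hnil]
      simp only [List.nil_append, zero_add, List.length_nil, Nat.sub_zero, hlen,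
        List.countP_eq_length_filter]
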